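-- pv_equiv track=rewrite | github.com/Elvira521feng/finance_info_extract | data_argument/NerArgument.py | __parser_ner
-- ===== SOURCE A (Python) =====
-- def __parser_ner(ner_data):
--     """
--     数据还原成NER数组，字数组，标签数组
--     :param ner_data:
--     :return:
--     """
--     sentence_arr = []
--     label_arr = []
--     for i in range(len(ner_data)):
--         entity_text_length = len(ner_data[i][1])
--         for j in range(entity_text_length):
--             if ner_data[i][0] == 'O':
--                 label_arr.append(ner_data[i][0])
--             else:
--                 if j == 0:
--                     label_arr.append('B-' + ner_data[i][0])
--                 elif j == entity_text_length - 1: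
--                     label_arr.append('L-' + ner_data[i][0])
--                 else:
--                     label_arr.append('I-' + ner_data[i][0])
--             # if entity_text_length == 1:
--             #     label_arr.append('U-' + ner_data[i][0])
--             sentence_arr.append(ner_data[i][1][j])
--     return sentence_arr, label_arr
-- ===== SOURCE B (Python) =====
-- def __parser_ner(ner_data):
--     """
--     数据还原成NER数组，字数组，标签数组
--     :param ner_data:
--     :return:
--     """
--     sentence_arr = []
--     label_arr = []
--     # flat state machine: consume one character at a time from an explicit stack;
--     # the label comes from the stream state, not from index arithmetic.
--     stack = list(reversed(ner_data))
--     tag = ''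
--     chars = []
--     seen = 0
--     while True:
--         if not chars:
--             if not stack:
--                 break
--             tag, text = stack.pop()
--             chars = list(reversed(text))
--             seen = 0
--             continue
--         c = chars.pop()
--         seen += 1
--         if tag == 'O':
--             lab = 'O'
--         elif seen == 1:
--             lab = 'B-' + tag
--         elif not chars:
--             lab = 'L-' + tag
--         else:
--             lab = 'I-' + tag
--         sentence_arr.append(c)
--         label_arr.append(lab)
--     return sentence_arr, label_arr
-- ===== Notes on version B (the rewrite author's own statement) =====
-- stated objective: alternative
-- what changed: Replaces the doubly-nested index loops (outer over entities, inner over character indices with j==0/last comparisons) by a single flat while-loop state machine that pops one character at a time from an explicit stack and derives each label from the stream state (a seen counter and exhaustion of the current entity's characters) instead of index arithmetic.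
import Mathlib
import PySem

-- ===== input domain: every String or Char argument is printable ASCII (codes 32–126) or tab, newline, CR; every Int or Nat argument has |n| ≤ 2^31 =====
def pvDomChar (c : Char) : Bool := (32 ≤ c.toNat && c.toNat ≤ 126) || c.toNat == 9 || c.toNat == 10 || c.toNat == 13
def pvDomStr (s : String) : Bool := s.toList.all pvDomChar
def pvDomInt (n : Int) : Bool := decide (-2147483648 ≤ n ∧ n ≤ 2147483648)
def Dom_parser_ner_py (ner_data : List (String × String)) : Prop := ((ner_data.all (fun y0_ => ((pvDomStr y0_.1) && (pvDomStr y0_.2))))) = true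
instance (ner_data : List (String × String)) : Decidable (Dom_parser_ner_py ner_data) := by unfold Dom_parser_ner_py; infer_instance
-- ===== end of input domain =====

-- B replaces the nested index loops by a flat character-at-a-time state machine over an
-- explicit stack; objective: alternative algorithm of the same cost.

-- ===== PORT A =====
-- literal transliteration: outer loop over i in range(len(ner_data)), inner loop over j,
-- per-index branching, appending one char and one label at a time.
def parser_ner_py (ner_data : List (String × String)) : List String × List String :=
  (List.range ner_data.length).foldl (fun st i =>
    let pair := ner_data.getD i ("", "")
    let chars := pair.2.toList
    let n := chars.length
    (List.range n).foldl (fun (st : List String × List String) j =>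
      let lab :=
        if pair.1 == "O" then pair.1
        else if j == 0 then "B-" ++ pair.1
        else if j == n - 1 then "L-" ++ pair.1
        else "I-" ++ pair.1
      (st.1 ++ [String.ofList [chars.getD j ' ']], st.2 ++ [lab])) st) ([], [])

-- ===== PORT B =====
-- transliteration of Source B's while-loop state machine.  Python keeps `stack` as
-- reversed(ner_data) and pops from the END, and `chars` as reversed(text) popped from the
-- END: in both cases elements are consumed in original order, so here the stack is the
-- list in original order popped from the HEAD (same values, same order).  `seen` counts
-- consumed characters of the current entity; the accumulator pair is the growing
-- (sentence_arr, label_arr).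
def pvGoB (stack : List (String × String)) (tag : String) (chars : List Char)
    (seen : Nat) (acc : List String × List String) : List String × List String :=
  match chars with
  | [] =>
      match stack with
      | [] => acc
      | (t, text) :: rest => pvGoB rest t text.toList 0 acc
  | c :: cs =>
      -- Python's locals seen += 1 and lab are inlined here (same values)
      pvGoB stack tag cs (seen + 1)
        (acc.1 ++ [String.ofList [c]],
         acc.2 ++ [if tag == "O" then "O"
                   else if seen + 1 == 1 then "B-" ++ tag
                   else if cs.isEmpty then "L-" ++ tag
                   else "I-" ++ tag])
termination_by 2 * ((stack.map (fun p => p.2.toList.length)).sum + chars.length) + stack.length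
decreasing_by
  all_goals (simp; try omega)

def parser_ner_py_alt (ner_data : List (String × String)) : List String × List String :=
  pvGoB ner_data "" [] 0 ([], [])

-- ===== PRECONDITION & SPEC =====
def Spec_parser_ner_py (ner_data : List (String × String)) (out : List String × List String) : Prop := out = parser_ner_py_alt ner_data
instance (ner_data : List (String × String)) (out : List String × List String) : Decidable (Spec_parser_ner_py ner_data out) := by unfold Spec_parser_ner_py; infer_instance

-- ===== CLAIM (what is proved, stated in full; the proofs are below) =====
def Claim_equal_parser_ner_py : Prop := ∀ (ner_data : List (String × String)), Dom_parser_ner_py ner_data → Spec_parser_ner_py ner_data (parser_ner_py ner_data)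

-- ===== LEMMAS AND PROOFS =====

-- the labels B's state machine emits for the rest `cs` of an entity, having already
-- consumed `seen` characters.
def pvLabelsFrom (tag : String) : List Char → Nat → List String
  | [], _ => []
  | _ :: cs, seen =>
      (if tag == "O" then "O"
       else if seen + 1 == 1 then "B-" ++ tag
       else if cs.isEmpty then "L-" ++ tag
       else "I-" ++ tag) :: pvLabelsFrom tag cs (seen + 1)

def pvCharsOf (p : String × String) : List String := p.2.toList.map (fun c => String.ofList [c])

def pvLabelsOf (p : String × String) : List String := pvLabelsFrom p.1 p.2.toList 0

-- common reference form: concatenation of per-entity char and label blocks.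
def pvSpecPair (ner_data : List (String × String)) : List String × List String :=
  (ner_data.flatMap pvCharsOf, ner_data.flatMap pvLabelsOf)

-- ---- B-side: the state machine computes pvSpecPair ----

theorem pvGoB_spec : ∀ (stack : List (String × String)) (tag : String) (chars : List Char)
    (seen : Nat) (acc : List String × List String),
    pvGoB stack tag chars seen acc
      = (acc.1 ++ chars.map (fun c => String.ofList [c]) ++ stack.flatMap pvCharsOf,
         acc.2 ++ pvLabelsFrom tag chars seen ++ stack.flatMap pvLabelsOf) := by
  intro stack tag chars seen acc
  induction stack, tag, chars, seen, acc using pvGoB.induct with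
  | case1 tag seen acc => simp [pvGoB, pvLabelsFrom]
  | case2 tag seen acc t text rest ih =>
      simp [pvGoB, pvLabelsFrom, ih, pvCharsOf, pvLabelsOf]
  | case3 stack tag seen acc c cs ih =>
      simp only [dite_eq_ite] at ih
      simp only [pvGoB]
      rw [ih]
      simp [pvLabelsFrom]

theorem alt_eq_spec (ner_data : List (String × String)) :
    parser_ner_py_alt ner_data = pvSpecPair ner_data := by
  simp [parser_ner_py_alt, pvGoB_spec, pvLabelsFrom, pvSpecPair]

-- ---- A-side lemmas ----

-- folding over range(l.length) with getD-indexing, when the body only uses the element,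
-- is folding over the list itself.
theorem foldl_range_getD {α β : Type} (F : α → β → β) (d : α) :
    ∀ (l : List α) (init : β),
      (List.range l.length).foldl (fun st i => F (l.getD i d) st) init
        = l.foldl (fun st x => F x st) init := by
  intro l
  induction l with
  | nil => intro init; simp
  | cons a l ih =>
    intro init
    have h : List.range (a :: l).length = 0 :: (List.range l.length).map (· + 1) := by
      simp [List.range_succ_eq_map]
    rw [h]
    simp only [List.foldl_cons, List.foldl_map]
    simpa using ih (F a init)

-- the inner per-index appending loop appends whole maps.
theorem foldl_append_pair {γ : Type} (c e : ℕ → γ) :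
    ∀ (n : ℕ) (st : List γ × List γ),
      (List.range n).foldl (fun (st : List γ × List γ) j => (st.1 ++ [c j], st.2 ++ [e j])) st
        = (st.1 ++ (List.range n).map c, st.2 ++ (List.range n).map e) := by
  intro n
  induction n with
  | zero => intro st; simp
  | succ n ih =>
    intro st
    rw [List.range_succ, List.foldl_append, ih]
    simp

-- A's per-index label map equals B's stream labels from a fresh entity.
theorem labelsFrom_eq_map (tag : String) :
    ∀ (cs : List Char) (seen : Nat),
      pvLabelsFrom tag cs seen
        = (List.range cs.length).map (fun j =>
            if tag == "O" then "O"
            else if seen + j == 0 then "B-" ++ tag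
            else if j == cs.length - 1 then "L-" ++ tag
            else "I-" ++ tag) := by
  intro cs
  induction cs with
  | nil => intro seen; simp [pvLabelsFrom]
  | cons c cs ih =>
    intro seen
    have h : List.range (c :: cs).length = 0 :: (List.range cs.length).map (· + 1) := by
      simp [List.range_succ_eq_map]
    rw [h, List.map_cons, List.map_map]
    simp only [pvLabelsFrom, ih (seen + 1)]
    congr 1
    · rcases cs with _ | ⟨c', cs'⟩ <;> simp
    · apply List.map_congr_left
      intro j hj
      simp only [List.mem_range] at hj
      simp only [Function.comp]
      have h1 : (seen + 1 + j == 0) = false := by simp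
      have h2 : (seen + (j + 1) == 0) = false := by simp
      have h3 : (j + 1 == (c :: cs).length - 1) = (j == cs.length - 1) := by
        simp only [List.length_cons]
        by_cases hje : j = cs.length - 1
        · subst hje; simp; omega
        · have : (j == cs.length - 1) = false := by simp [hje]
          rw [this]; simp; omega
      rw [h1, h2, h3]

theorem a_eq_spec (ner_data : List (String × String)) :
    parser_ner_py ner_data = pvSpecPair ner_data := by
  unfold parser_ner_py
  rw [foldl_range_getD (fun p st =>
    (List.range p.2.toList.length).foldl (fun (st : List String × List String) j =>
      (st.1 ++ [String.ofList [p.2.toList.getD j ' ']], st.2 ++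
        [if p.1 == "O" then p.1
         else if j == 0 then "B-" ++ p.1
         else if j == p.2.toList.length - 1 then "L-" ++ p.1
         else "I-" ++ p.1])) st) ("", "")]
  induction ner_data using List.reverseRecOn with
  | nil => simp [pvSpecPair]
  | append_singleton l p ih =>
    rw [List.foldl_append, List.foldl_cons, List.foldl_nil, ih]
    rw [foldl_append_pair]
    have hmap : (List.range p.2.toList.length).map (fun i => String.ofList [p.2.toList.getD i ' '])
        = p.2.toList.map (fun c => String.ofList [c]) := by
      apply List.ext_getElem
      · simp
      · intro i h1 h2
        simp only [List.length_map] at h2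
        simp [List.getD, List.getElem?_eq_getElem h2]
    have hlab : (List.range p.2.toList.length).map (fun j =>
          if p.1 == "O" then p.1
          else if j == 0 then "B-" ++ p.1
          else if j == p.2.toList.length - 1 then "L-" ++ p.1
          else "I-" ++ p.1) = pvLabelsOf p := by
      rw [pvLabelsOf, labelsFrom_eq_map]
      apply List.map_congr_left
      intro j _
      by_cases hO : p.1 == "O"
      · have : p.1 = "O" := by simpa using hO
        simp [this]
      · simp only [hO, Bool.false_eq_true, if_false]
        have : (0 + j == 0) = (j == 0) := by simp
        rw [this]
    rw [hmap, hlab]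
    simp [pvSpecPair, pvCharsOf]

-- ===== VERDICT (by name: the statement is the Claim_ definition above) =====
theorem parser_ner_py_spec : Claim_equal_parser_ner_py := by
  intro ner_data _
  unfold Spec_parser_ner_py
  rw [a_eq_spec, alt_eq_spec]
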